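/- GENERATED by c/gen_decode.py: decode facts of the image, one per distinct instruction byte string. -/
import UserX.DecodeImage

#decode_all Vorbis.Dec
  "01f6"  -- add esi,esi
  "0f8403020000"  -- je 114415
  "0f84d3fdffff"  -- je 113b22
  "0f8749ffffff"  -- ja 11400e
  "0f8eb0010000"  -- jle 111265
  "0fb6542430"  -- movzx edx,BYTE PTR [rsp+0x30]
  "2b9c24c00b0000"  -- sub ebx,DWORD PTR [rsp+0xbc0]
  "41036e04"  -- add ebp,DWORD PTR [r14+0x4]
  "41399f38060000"  -- cmp DWORD PTR [r15+0x638],ebx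
  "4183fc0f"  -- cmp r12d,0xf
  "4189fc"  -- mov r12d,edi
  "41c0ed04"  -- shr r13b,0x4
  "42891ca5001c1200"  -- mov DWORD PTR [r12*4+0x121c00],ebx
  "44396504"  -- cmp DWORD PTR [rbp+0x4],r12d
  "4489642448"  -- mov DWORD PTR [rsp+0x48],r12d
  "4489cd"  -- mov ebp,r9d
  "448b7b04"  -- mov r15d,DWORD PTR [rbx+0x4]
  "450fb6ff"  -- movzx r15d,r15b
  "4589ee"  -- mov r14d,r13d
  "468b74bc50"  -- mov r14d,DWORD PTR [rsp+r15*4+0x50]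
  "48634580"  -- movsxd rax,DWORD PTR [rbp-0x80]
  "4881c4f8000000"  -- add rsp,0xf8
  "4885c0"  -- test rax,rax
  "4889c2"  -- mov rdx,rax
  "488b542438"  -- mov rdx,QWORD PTR [rsp+0x38]
  "488d041b"  -- lea rax,[rbx+rbx*1]
  "488d7804"  -- lea rdi,[rax+0x4]
  "488d7df0"  -- lea rdi,[rbp-0x10]
  "488dbbd0050000"  -- lea rdi,[rbx+0x5d0]
  "488dbde8060000"  -- lea rdi,[rbp+0x6e8]
  "48c7810000c00000000000"  -- mov QWORD PTR [rcx+0xc00000],0x0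
  "496306"  -- movsxd rax,DWORD PTR [r14]
  "4989d7"  -- mov r15,rdx
  "498d7c241c"  -- lea rdi,[r12+0x1c]
  "498dbe70050000"  -- lea rdi,[r14+0x570]
  "4a8d7c6500"  -- lea rdi,[rbp+r12*2+0x0]
  "4c03a5c8010000"  -- add r12,QWORD PTR [rbp+0x1c8]
  "4c89b538ffffff"  -- mov QWORD PTR [rbp-0xc8],r14
  "4c8b7c2440"  -- mov r15,QWORD PTR [rsp+0x40]
  "4c8dadb0000000"  -- lea r13,[rbp+0xb0]
  "4d8b74dd08"  -- mov r14,QWORD PTR [r13+rbx*8+0x8]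
  "660f28c8"  -- movapd xmm1,xmm0
  "66410f6ede"  -- movd xmm3,r14d
  "66480f7eed"  -- movq rbp,xmm5
  "7419"  -- je 1024d5
  "7501"  -- jne 100b46
  "771e"  -- ja 10bb6f
  "7e04"  -- jle 1145db
  "7fad"  -- jg 107897
  "838528ffffff01"  -- add DWORD PTR [rbp-0xd8],0x1
  "85db"  -- test ebx,ebx
  "896c2408"  -- mov DWORD PTR [rsp+0x8],ebp
  "89e9"  -- mov ecx,ebp
  "8b542440"  -- mov edx,DWORD PTR [rsp+0x40]
  "8b8c24c00b0000"  -- mov ecx,DWORD PTR [rsp+0xbc0]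
  "b804000000"  -- mov eax,0x4
  "c1e605"  -- shl esi,0x5
  "c7805c01c000f3f3f3f3"  -- mov DWORD PTR [rax+0xc0015c],0xf3f3f3f3
  "d3e8"  -- shr eax,cl
  "e8096cffff"  -- call 10d1c0
  "e812f7feff"  -- call 100640
  "e81c67ffff"  -- call 10b1e0
  "e826f0feff"  -- call 100800
  "e82f41ffff"  -- call 108dc0
  "e83990ffff"  -- call 100800
  "e844fcfeff"  -- call 101520
  "e84ec2ffff"  -- call 100800
  "e85a7bffff"  -- call 100cc0
  "e868fffeff"  -- call 103d00
  "e873ecfeff"  -- call 100640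
  "e87e09ffff"  -- call 100300
  "e8899cffff"  -- call 100640
  "e8939efeff"  -- call 100480
  "e89d6bfeff"  -- call 100720
  "e8a7affeff"  -- call 1008e0
  "e8b1adffff"  -- call 100640
  "e8bb9ffeff"  -- call 100560
  "e8c64effff"  -- call 100300
  "e8cfc3feff"  -- call 100720
  "e8da22ffff"  -- call 100640
  "e8e3a6ffff"  -- call 100640
  "e8ec7bffff"  -- call 10d1c0
  "e8f694ffff"  -- call 100640
  "e906fbffff"  -- jmp 114298
  "e948fcffff"  -- jmp 113b22
  "e99cedffff"  -- jmp 113b22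
  "e9edd7ffff"  -- jmp 113b22
  "eb71"  -- jmp 107240
  "ebdd"  -- jmp 102d05
  "f20f5805a7d70100"  -- addsd xmm0,QWORD PTR [rip+0x1d7a7]
  "f20f5e153ce00100"  -- divsd xmm2,QWORD PTR [rip+0x1e03c]
  "f30f104dc0"  -- movss xmm1,DWORD PTR [rbp-0x40]
  "f30f10742408"  -- movss xmm6,DWORD PTR [rsp+0x8]
  "f30f114df8"  -- movss DWORD PTR [rbp-0x8],xmm1
  "f30f1174241c"  -- movss DWORD PTR [rsp+0x1c],xmm6
  "f30f58d6"  -- addss xmm2,xmm6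
  "f30f59e3"  -- mulss xmm4,xmm3
  "f3410f101c24"  -- movss xmm3,DWORD PTR [r12]
  "f3410f58e0"  -- addss xmm4,xmm8
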